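-- pv_equiv track=rewrite | github.com/Arx88/Mitosis-ARX2 | backend/agent_core.py | _determine_task_type_from_capabilities
-- ===== SOURCE A (Python) =====
-- from typing import List, Dict, Optional, Any, Union
--
-- def _determine_task_type_from_capabilities(capabilities: List[str]) -> str:
--     """Determina el tipo de tarea basándose en las capacidades requeridas"""
--     capability_mapping = {
--         "code": ["code_generation", "programming", "development"],
--         "analysis": ["analysis", "research", "investigation"],
--         "chat": ["communication", "interaction", "conversation"],
--         "general": ["general", "misc", "other"]
--     }
--
--     for task_type, keywords in capability_mapping.items():
--         if any(keyword in cap.lower() for cap in capabilities for keyword in keywords):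
--             return task_type
--
--     return "general"
-- ===== SOURCE B (Python) =====
-- def _determine_task_type_from_capabilities(capabilities):
--     """Single pass: lowercase each capability once, collect every task type whose
--     keyword occurs as a substring, then resolve by the mapping's priority order."""
--     keyword_to_type = {
--         "code_generation": "code", "programming": "code", "development": "code",
--         "analysis": "analysis", "research": "analysis", "investigation": "analysis",
--         "communication": "chat", "interaction": "chat", "conversation": "chat",
--         "general": "general", "misc": "general", "other": "general",
--     }
--     matched = set()
--     for cap in capabilities:
--         low = cap.lower()
--         for kw, tt in keyword_to_type.items():
--             if kw in low:
--                 matched.add(tt)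
--     for tt in ("code", "analysis", "chat", "general"):
--         if tt in matched:
--             return tt
--     return "general"
-- ===== Notes on version B (the rewrite author's own statement) =====
-- stated objective: faster
-- what changed: B inverts the loop nesting: one pass over capabilities lowercases each capability once and collects every matched task type into a set, then resolves priority afterwards by scanning the mapping order, instead of A's priority-ordered short-circuiting scan that re-lowercases every capability for each task type.
import Mathlib
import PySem

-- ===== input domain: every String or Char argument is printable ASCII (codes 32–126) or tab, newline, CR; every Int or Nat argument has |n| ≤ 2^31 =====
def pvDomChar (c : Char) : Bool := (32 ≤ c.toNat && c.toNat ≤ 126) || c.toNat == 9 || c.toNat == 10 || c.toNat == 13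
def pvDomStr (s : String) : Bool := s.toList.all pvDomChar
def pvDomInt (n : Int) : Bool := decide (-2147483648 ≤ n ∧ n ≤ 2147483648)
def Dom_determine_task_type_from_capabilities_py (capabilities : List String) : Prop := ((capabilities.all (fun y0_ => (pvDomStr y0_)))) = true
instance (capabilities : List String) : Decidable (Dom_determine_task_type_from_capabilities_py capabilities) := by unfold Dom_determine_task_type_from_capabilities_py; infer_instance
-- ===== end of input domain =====

-- B is an alternative decomposition of the same classification: one pass over the
-- capabilities collecting matched task types into a set, priority resolved afterwards.

-- ===== PORT A =====
-- A's capability_mapping dict, in insertion order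
def pvMappingA : List (String × List String) :=
  [("code", ["code_generation", "programming", "development"]),
   ("analysis", ["analysis", "research", "investigation"]),
   ("chat", ["communication", "interaction", "conversation"]),
   ("general", ["general", "misc", "other"])]

-- A's loop over the mapping: return the first task_type with a matching keyword
def pvGoA (capabilities : List String) : List (String × List String) → String
  | [] => "general"
  | (task_type, keywords) :: rest =>
    if capabilities.any (fun cap => keywords.any (fun keyword => PySem.Str.isIn keyword (PySem.Str.lower cap))) then
      task_type
    else pvGoA capabilities rest

def determine_task_type_from_capabilities_py (capabilities : List String) : String :=
  pvGoA capabilities pvMappingA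

-- ===== PORT B =====
-- B's inverted keyword_to_type dict
def pvKw2Ty : List (String × String) :=
  [("code_generation", "code"), ("programming", "code"), ("development", "code"),
   ("analysis", "analysis"), ("research", "analysis"), ("investigation", "analysis"),
   ("communication", "chat"), ("interaction", "chat"), ("conversation", "chat"),
   ("general", "general"), ("misc", "general"), ("other", "general")]

-- B's first pass: collect every matched task type into a set
def pvMatched (capabilities : List String) : PySem.Set String :=
  capabilities.foldl
    (fun s cap =>
      let low := PySem.Str.lower cap
      pvKw2Ty.foldl (fun s p => if PySem.Str.isIn p.1 low then PySem.Set.add s p.2 else s) s)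
    PySem.Set.empty

-- B's second pass: first task type (in priority order) present in the set
def pvPick (matched : PySem.Set String) : List String → String
  | [] => "general"
  | tt :: rest => if PySem.Set.contains matched tt then tt else pvPick matched rest

def determine_task_type_from_capabilities_py_alt (capabilities : List String) : String :=
  pvPick (pvMatched capabilities) ["code", "analysis", "chat", "general"]

-- ===== PRECONDITION & SPEC =====
def Spec_determine_task_type_from_capabilities_py (capabilities : List String) (out : String) : Prop := out = determine_task_type_from_capabilities_py_alt capabilities
instance (capabilities : List String) (out : String) : Decidable (Spec_determine_task_type_from_capabilities_py capabilities out) := by unfold Spec_determine_task_type_from_capabilities_py; infer_instance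

-- ===== CLAIM (what is proved, stated in full; the proofs are below) =====
def Claim_equal_determine_task_type_from_capabilities_py : Prop := ∀ (capabilities : List String), Dom_determine_task_type_from_capabilities_py capabilities → Spec_determine_task_type_from_capabilities_py capabilities (determine_task_type_from_capabilities_py capabilities)

-- ===== LEMMAS AND PROOFS =====

-- membership in B's inner fold over the keyword table
lemma mem_inner_fold (low : List Char) (tt : String) (ps : List (String × String)) (s : PySem.Set String) :
    tt ∈ ps.foldl (fun s p => if PySem.Chars.isIn p.1.toList low then PySem.Set.add s p.2 else s) s ↔
      tt ∈ s ∨ ∃ p ∈ ps, PySem.Chars.isIn p.1.toList low = true ∧ p.2 = tt := by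
  induction ps generalizing s with
  | nil => simp
  | cons p ps ih =>
    simp only [List.foldl_cons, ih, List.mem_cons]
    by_cases h : PySem.Chars.isIn p.1.toList low = true
    · simp [h, PySem.Set.mem_add]; tauto
    · simp [h]

-- membership in B's matched set: some capability whose lowercase contains a keyword mapped to tt
lemma mem_matched (capabilities : List String) (tt : String) :
    tt ∈ pvMatched capabilities ↔
      ∃ cap ∈ capabilities, ∃ p ∈ pvKw2Ty,
        PySem.Chars.isIn p.1.toList (PySem.Chars.lower cap.toList) = true ∧ p.2 = tt := by
  have key : ∀ (caps : List String) (s : PySem.Set String),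
      tt ∈ caps.foldl
        (fun s cap =>
          let low := PySem.Str.lower cap
          pvKw2Ty.foldl (fun s p => if PySem.Str.isIn p.1 low then PySem.Set.add s p.2 else s) s) s ↔
      tt ∈ s ∨ ∃ cap ∈ caps, ∃ p ∈ pvKw2Ty,
        PySem.Chars.isIn p.1.toList (PySem.Chars.lower cap.toList) = true ∧ p.2 = tt := by
    intro caps
    induction caps with
    | nil => simp
    | cons c cs ih =>
      intro s
      simp only [List.foldl_cons, ih, List.mem_cons]
      rw [show (fun (s : PySem.Set String) (p : String × String) =>
            if PySem.Str.isIn p.1 (PySem.Str.lower c) then PySem.Set.add s p.2 else s)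
          = (fun s p => if PySem.Chars.isIn p.1.toList (PySem.Chars.lower c.toList) then PySem.Set.add s p.2 else s) by
        funext s p; simp [PySem.Str.isIn, PySem.Str.lower]]
      rw [mem_inner_fold]
      constructor
      · rintro (⟨h | h⟩ | h)
        · exact Or.inl h
        · exact Or.inr ⟨c, Or.inl rfl, h⟩
        · obtain ⟨cap, hc, hp⟩ := h; exact Or.inr ⟨cap, Or.inr hc, hp⟩
      · rintro (h | ⟨cap, hc | hc, hp⟩)
        · exact Or.inl (Or.inl h)
        · subst hc; exact Or.inl (Or.inr hp)
        · exact Or.inr ⟨cap, hc, hp⟩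
  exact (key capabilities PySem.Set.empty).trans (by simp [PySem.Set.empty])

-- A's test for one row of the mapping, as an existence statement
lemma anyA_iff (capabilities : List String) (kws : List String) :
    (capabilities.any (fun cap => kws.any (fun keyword => PySem.Str.isIn keyword (PySem.Str.lower cap))) = true) ↔
      ∃ cap ∈ capabilities, ∃ kw ∈ kws, PySem.Chars.isIn kw.toList (PySem.Chars.lower cap.toList) = true := by
  simp [List.any_eq_true, PySem.Str.isIn, PySem.Str.lower]

-- B's membership test agrees with A's row test, for each of the four task types
lemma contains_code (capabilities : List String) :
    (PySem.Set.contains (pvMatched capabilities) "code" = true) ↔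
      ∃ cap ∈ capabilities, ∃ kw ∈ (["code_generation", "programming", "development"] : List String),
        PySem.Chars.isIn kw.toList (PySem.Chars.lower cap.toList) = true := by
  rw [PySem.Set.contains_iff, mem_matched]
  constructor
  · rintro ⟨cap, hc, p, hp, hin, htt⟩
    refine ⟨cap, hc, p.1, ?_, hin⟩
    fin_cases hp <;> simp_all
  · rintro ⟨cap, hc, kw, hkw, hin⟩
    refine ⟨cap, hc, (kw, "code"), ?_, hin, rfl⟩
    fin_cases hkw <;> simp [pvKw2Ty]

lemma contains_analysis (capabilities : List String) :
    (PySem.Set.contains (pvMatched capabilities) "analysis" = true) ↔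
      ∃ cap ∈ capabilities, ∃ kw ∈ (["analysis", "research", "investigation"] : List String),
        PySem.Chars.isIn kw.toList (PySem.Chars.lower cap.toList) = true := by
  rw [PySem.Set.contains_iff, mem_matched]
  constructor
  · rintro ⟨cap, hc, p, hp, hin, htt⟩
    refine ⟨cap, hc, p.1, ?_, hin⟩
    fin_cases hp <;> simp_all
  · rintro ⟨cap, hc, kw, hkw, hin⟩
    refine ⟨cap, hc, (kw, "analysis"), ?_, hin, rfl⟩
    fin_cases hkw <;> simp [pvKw2Ty]

lemma contains_chat (capabilities : List String) :
    (PySem.Set.contains (pvMatched capabilities) "chat" = true) ↔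
      ∃ cap ∈ capabilities, ∃ kw ∈ (["communication", "interaction", "conversation"] : List String),
        PySem.Chars.isIn kw.toList (PySem.Chars.lower cap.toList) = true := by
  rw [PySem.Set.contains_iff, mem_matched]
  constructor
  · rintro ⟨cap, hc, p, hp, hin, htt⟩
    refine ⟨cap, hc, p.1, ?_, hin⟩
    fin_cases hp <;> simp_all
  · rintro ⟨cap, hc, kw, hkw, hin⟩
    refine ⟨cap, hc, (kw, "chat"), ?_, hin, rfl⟩
    fin_cases hkw <;> simp [pvKw2Ty]

lemma contains_general (capabilities : List String) :
    (PySem.Set.contains (pvMatched capabilities) "general" = true) ↔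
      ∃ cap ∈ capabilities, ∃ kw ∈ (["general", "misc", "other"] : List String),
        PySem.Chars.isIn kw.toList (PySem.Chars.lower cap.toList) = true := by
  rw [PySem.Set.contains_iff, mem_matched]
  constructor
  · rintro ⟨cap, hc, p, hp, hin, htt⟩
    refine ⟨cap, hc, p.1, ?_, hin⟩
    fin_cases hp <;> simp_all
  · rintro ⟨cap, hc, kw, hkw, hin⟩
    refine ⟨cap, hc, (kw, "general"), ?_, hin, rfl⟩
    fin_cases hkw <;> simp [pvKw2Ty]

-- ===== VERDICT (by name: the statement is the Claim_ definition above) =====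
theorem determine_task_type_from_capabilities_py_spec : Claim_equal_determine_task_type_from_capabilities_py := by
  intro capabilities _
  unfold Spec_determine_task_type_from_capabilities_py
  unfold determine_task_type_from_capabilities_py determine_task_type_from_capabilities_py_alt
  unfold pvMappingA
  simp only [pvGoA, pvPick]
  by_cases h1 : PySem.Set.contains (pvMatched capabilities) "code" = true
  · rw [if_pos h1, if_pos ((anyA_iff _ _).mpr ((contains_code _).mp h1))]
  · rw [if_neg h1, if_neg (fun h => h1 ((contains_code _).mpr ((anyA_iff _ _).mp h)))]
    by_cases h2 : PySem.Set.contains (pvMatched capabilities) "analysis" = true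
    · rw [if_pos h2, if_pos ((anyA_iff _ _).mpr ((contains_analysis _).mp h2))]
    · rw [if_neg h2, if_neg (fun h => h2 ((contains_analysis _).mpr ((anyA_iff _ _).mp h)))]
      by_cases h3 : PySem.Set.contains (pvMatched capabilities) "chat" = true
      · rw [if_pos h3, if_pos ((anyA_iff _ _).mpr ((contains_chat _).mp h3))]
      · rw [if_neg h3, if_neg (fun h => h3 ((contains_chat _).mpr ((anyA_iff _ _).mp h)))]
        by_cases h4 : PySem.Set.contains (pvMatched capabilities) "general" = true
        · rw [if_pos h4, if_pos ((anyA_iff _ _).mpr ((contains_general _).mp h4))]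
        · rw [if_neg h4, if_neg (fun h => h4 ((contains_general _).mpr ((anyA_iff _ _).mp h)))]
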